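-- pv_equiv track=rewrite | github.com/AlphaTechnic/Algorithm_Contest | 2021-11-06_U_Tech_Course_Test/1.py | solution
-- ===== SOURCE A (Python) =====
-- def solution(arr):
--     # write your code in Python 3.6
--     even_max = odd_max = 0
--     for i in range(len(arr)):
--         if arr[i] % 2 == 0 and arr[i] > even_max:
--             even_max = arr[i]
--         elif arr[i] % 2 == 1 and arr[i] > odd_max:
--             odd_max = arr[i]
--
--     return even_max + odd_max
-- ===== SOURCE B (Python) =====
-- def solution(arr):
--     even_max = max([x for x in arr if x % 2 == 0 and x > 0], default=0)
--     odd_max = max([x for x in arr if x % 2 == 1 and x > 0], default=0)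
--     return even_max + odd_max
-- ===== Notes on version B (the rewrite author's own statement) =====
-- stated objective: simpler
-- what changed: Replaces the single index loop that threads a two-field branch-updating state with two independent filtered max() reductions (default=0) whose results are summed.
import Mathlib
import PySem

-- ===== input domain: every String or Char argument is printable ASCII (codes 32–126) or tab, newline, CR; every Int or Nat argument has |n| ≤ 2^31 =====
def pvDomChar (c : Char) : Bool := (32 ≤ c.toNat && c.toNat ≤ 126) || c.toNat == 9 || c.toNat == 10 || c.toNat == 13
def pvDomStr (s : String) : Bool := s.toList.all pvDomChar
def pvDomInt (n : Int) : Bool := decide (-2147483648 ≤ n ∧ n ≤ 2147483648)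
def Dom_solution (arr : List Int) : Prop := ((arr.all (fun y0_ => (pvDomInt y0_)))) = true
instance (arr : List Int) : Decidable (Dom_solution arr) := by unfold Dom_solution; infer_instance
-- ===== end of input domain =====

-- B replaces A's single branch-tracking loop by two independent filtered max reductions (objective: simpler).

-- ===== PORT A =====
-- for i in range(len(arr)): update (even_max, odd_max) by the two guarded branches
def solution (arr : List Int) : Int :=
  let st := (PySem.List.pyRange 0 (arr.length : Int) 1).foldl
    (fun (st : Int × Int) i =>
      let x := PySem.List.pyGetD arr i 0
      if PySem.Int.mod x 2 = 0 ∧ st.1 < x then (x, st.2)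
      else if PySem.Int.mod x 2 = 1 ∧ st.2 < x then (st.1, x)
      else st) ((0 : Int), (0 : Int))
  st.1 + st.2

-- ===== PORT B =====
def solution_alt (arr : List Int) : Int :=
  let even_max := PySem.List.maxD (arr.filter (fun x => decide (PySem.Int.mod x 2 = 0 ∧ 0 < x))) (fun y => y) 0
  let odd_max := PySem.List.maxD (arr.filter (fun x => decide (PySem.Int.mod x 2 = 1 ∧ 0 < x))) (fun y => y) 0
  even_max + odd_max

-- ===== PRECONDITION & SPEC =====
def Spec_solution (arr : List Int) (out : Int) : Prop := out = solution_alt arr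
instance (arr : List Int) (out : Int) : Decidable (Spec_solution arr out) := by unfold Spec_solution; infer_instance

-- ===== CLAIM (what is proved, stated in full; the proofs are below) =====
def Claim_equal_solution : Prop := ∀ (arr : List Int), Dom_solution arr → Spec_solution arr (solution arr)

-- ===== LEMMAS AND PROOFS =====

-- Python's x % 2 is 0 or 1 (divisor positive)
lemma mod2_cases (x : Int) : PySem.Int.mod x 2 = 0 ∨ PySem.Int.mod x 2 = 1 := by
  have h1 : Int.fmod x 2 = x % 2 := by simp [Int.fmod_eq_emod]
  simp only [PySem.Int.mod, h1]
  omega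

-- the loop invariant: A's fold from (e,o) computes the two running maxima of the filtered lists
lemma loop_invariant (arr : List Int) (e o : Int) (he : 0 ≤ e) (ho : 0 ≤ o) :
    arr.foldl
      (fun (st : Int × Int) x =>
        if PySem.Int.mod x 2 = 0 ∧ st.1 < x then (x, st.2)
        else if PySem.Int.mod x 2 = 1 ∧ st.2 < x then (st.1, x)
        else st) (e, o)
    = ((arr.filter (fun x => decide (PySem.Int.mod x 2 = 0 ∧ 0 < x))).foldl max e,
       (arr.filter (fun x => decide (PySem.Int.mod x 2 = 1 ∧ 0 < x))).foldl max o) := by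
  induction arr generalizing e o with
  | nil => rfl
  | cons x t ih =>
    simp only [List.foldl_cons, List.filter_cons, decide_eq_true_eq]
    rcases mod2_cases x with hm | hm
    · -- x even
      by_cases hex : e < x
      · have hx : 0 < x := lt_of_le_of_lt he hex
        rw [if_pos ⟨hm, hex⟩, if_pos (show PySem.Int.mod x 2 = 0 ∧ 0 < x from ⟨hm, hx⟩),
            if_neg (show ¬(PySem.Int.mod x 2 = 1 ∧ 0 < x) by omega)]
        rw [ih x o (le_of_lt hx) ho]
        simp only [List.foldl_cons, max_eq_right (le_of_lt hex)]
      · rw [if_neg (by omega : ¬(PySem.Int.mod x 2 = 0 ∧ e < x)),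
            if_neg (show ¬(PySem.Int.mod x 2 = 1 ∧ o < x) by omega),
            if_neg (show ¬(PySem.Int.mod x 2 = 1 ∧ 0 < x) by omega)]
        by_cases hx : 0 < x
        · rw [if_pos (show PySem.Int.mod x 2 = 0 ∧ 0 < x from ⟨hm, hx⟩)]
          simp only [List.foldl_cons, max_eq_left (by omega : x ≤ e)]
          exact ih e o he ho
        · rw [if_neg (show ¬(PySem.Int.mod x 2 = 0 ∧ 0 < x) by omega)]
          exact ih e o he ho
    · -- x odd
      rw [if_neg (show ¬(PySem.Int.mod x 2 = 0 ∧ e < x) by omega),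
          if_neg (show ¬(PySem.Int.mod x 2 = 0 ∧ 0 < x) by omega)]
      by_cases hox : o < x
      · have hx : 0 < x := lt_of_le_of_lt ho hox
        rw [if_pos ⟨hm, hox⟩, if_pos (show PySem.Int.mod x 2 = 1 ∧ 0 < x from ⟨hm, hx⟩)]
        rw [ih e x he (le_of_lt hx)]
        simp only [List.foldl_cons, max_eq_right (le_of_lt hox)]
      · rw [if_neg (show ¬(PySem.Int.mod x 2 = 1 ∧ o < x) by omega)]
        by_cases hx : 0 < x
        · rw [if_pos (show PySem.Int.mod x 2 = 1 ∧ 0 < x from ⟨hm, hx⟩)]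
          simp only [List.foldl_cons, max_eq_left (by omega : x ≤ o)]
          exact ih e o he ho
        · rw [if_neg (show ¬(PySem.Int.mod x 2 = 1 ∧ 0 < x) by omega)]
          exact ih e o he ho

-- max(xs, default=0) is the running max from 0 when all elements are nonnegative
lemma maxD_eq_foldl (xs : List Int) (h : ∀ x ∈ xs, 0 ≤ x) :
    PySem.List.maxD xs (fun y => y) 0 = xs.foldl max 0 := by
  cases xs with
  | nil => rfl
  | cons x t =>
    have hx : 0 ≤ x := h x (List.mem_cons_self ..)
    rw [PySem.List.maxD, PySem.List.max?_id_cons]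
    simp [max_eq_right hx]

-- ===== VERDICT (by name: the statement is the Claim_ definition above) =====
theorem solution_spec : Claim_equal_solution := by
  intro arr _
  unfold Spec_solution solution solution_alt
  rw [PySem.List.foldl_pyRange_zero_pyGetD' arr 0
    (fun (st : Int × Int) x =>
        if PySem.Int.mod x 2 = 0 ∧ st.1 < x then (x, st.2)
        else if PySem.Int.mod x 2 = 1 ∧ st.2 < x then (st.1, x)
        else st) ((0 : Int), (0 : Int))]
  rw [loop_invariant arr 0 0 le_rfl le_rfl]
  rw [maxD_eq_foldl _ (by intro x hx; simp at hx; omega),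
      maxD_eq_foldl _ (by intro x hx; simp at hx; omega)]
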